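-- pv_equiv track=rewrite | github.com/MDBijman/alphabet-cover-problem | src/compute.py | number_to_letters
-- ===== SOURCE A (Python) =====
-- def number_to_letters(n):
--     letters = []
--     i = 0
--     while i < 32:
--         if n & 1 == 1:
--             letters.append(chr(ord('a') + i))
--         i += 1
--         n = n >> 1
--     return letters
-- ===== SOURCE B (Python) =====
-- def number_to_letters(n):
--     n &= 0xFFFFFFFF  # Python's >> on negatives is arithmetic, so A reads the low 32 two's-complement bits
--     letters = []
--     while n:
--         i = (n & -n).bit_length() - 1
--         letters.append(chr(ord('a') + i))
--         n &= n - 1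
--     return letters
-- ===== Notes on version B (the rewrite author's own statement) =====
-- stated objective: alternative
-- what changed: B replaces A's fixed scan over all 32 bit positions with a lowest-set-bit extraction loop (mask to 32 bits once, then repeatedly take (n & -n).bit_length()-1 and clear the bit), so it iterates only over the set bits.
import Mathlib
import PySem

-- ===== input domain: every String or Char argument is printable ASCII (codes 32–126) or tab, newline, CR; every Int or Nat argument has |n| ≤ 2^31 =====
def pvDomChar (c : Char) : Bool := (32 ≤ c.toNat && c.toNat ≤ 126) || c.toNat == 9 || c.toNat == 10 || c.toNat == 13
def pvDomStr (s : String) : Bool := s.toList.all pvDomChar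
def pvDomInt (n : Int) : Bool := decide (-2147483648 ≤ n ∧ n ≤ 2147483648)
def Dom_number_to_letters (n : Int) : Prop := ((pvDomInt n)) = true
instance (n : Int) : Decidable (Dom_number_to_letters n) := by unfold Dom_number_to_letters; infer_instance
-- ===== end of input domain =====

-- B replaces A's fixed 32-position bit scan with a lowest-set-bit extraction loop over the set bits only (alternative algorithm, same exact output).

-- ===== PORT A =====
-- the while loop: i counts 0..31, n is shifted right each step (Python's arithmetic >> is Int's >>>)
def numToLettersScan (n : Int) (i : Nat) (letters : List String) : List String :=
  if i < 32 then
    numToLettersScan (n >>> 1) (i + 1)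
      (if PySem.Int.band n 1 == 1 then letters ++ [String.ofList [Char.ofNat (97 + i)]] else letters)
  else letters
termination_by 32 - i

def number_to_letters (n : Int) : List String :=
  numToLettersScan n 0 []

-- ===== PORT B =====
-- the while loop of Source B; its state n is nonnegative throughout (it starts as n & 0xFFFFFFFF), so it is carried as a Nat.
-- (n & -n).bit_length() - 1 is ported literally via PySem.Int.band / PySem.Int.bitLength; n &= n - 1 is Nat's &&& (exact on nonnegatives)
def numToLettersPop (m : Nat) (letters : List String) : List String :=
  if h : m = 0 then letters
  else
    numToLettersPop (m &&& (m - 1))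
      (letters ++ [String.ofList [Char.ofNat (97 + (PySem.Int.bitLength (PySem.Int.band (m : Int) (-(m : Int))) - 1))]])
termination_by m
decreasing_by
  exact lt_of_le_of_lt Nat.and_le_right (Nat.sub_one_lt h)

def number_to_letters_alt (n : Int) : List String :=
  numToLettersPop ((PySem.Int.band n 0xFFFFFFFF).toNat) []

-- ===== PRECONDITION & SPEC =====
def Spec_number_to_letters (n : Int) (out : List String) : Prop := out = number_to_letters_alt n
instance (n : Int) (out : List String) : Decidable (Spec_number_to_letters n out) := by unfold Spec_number_to_letters; infer_instance

-- ===== CLAIM (what is proved, stated in full; the proofs are below) =====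
def Claim_equal_number_to_letters : Prop := ∀ (n : Int), Dom_number_to_letters n → Spec_number_to_letters n (number_to_letters n)

-- ===== LEMMAS AND PROOFS =====

-- the letter for bit index j
def pvLetter (j : Nat) : String := String.ofList [Char.ofNat (97 + j)]

-- indices of the set bits among the low f bits of m, in increasing order
def pvIdxs : Nat → Nat → List Nat
  | 0, _ => []
  | f + 1, m => (if m % 2 = 1 then [0] else []) ++ (pvIdxs f (m / 2)).map (· + 1)

-- the low-f-bits window of n, as Python computes it: n & (2^f - 1)
def pvWin (f : Nat) (n : Int) : Nat := (PySem.Int.band n ((2 : Int) ^ f - 1)).toNat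

theorem pvIdxs_zero (f : Nat) : pvIdxs f 0 = [] := by
  induction f with
  | zero => rfl
  | succ f ih => simp [pvIdxs, ih]

theorem pvMask_cast (f : Nat) : ((2 : Int) ^ f - 1) = ((2 ^ f - 1 : Nat) : Int) := by
  have : (1 : Nat) ≤ 2 ^ f := Nat.one_le_two_pow
  push_cast [this]
  ring

theorem pvWin_ofNat (f m : Nat) : pvWin f (Int.ofNat m) = m % 2 ^ f := by
  simp only [pvWin, pvMask_cast]
  rw [show (Int.ofNat m) = ((m : Nat) : Int) from rfl, PySem.Int.band_natCast,
    Nat.and_two_pow_sub_one_eq_mod]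
  exact Int.toNat_natCast _

theorem pvWin_negSucc (f p : Nat) : pvWin f (Int.negSucc p) = 2 ^ f - 1 - p % 2 ^ f := by
  have hge : (0 : Int) ≤ (2 : Int) ^ f - 1 := by
    rw [pvMask_cast]; exact_mod_cast Nat.zero_le _
  simp only [pvWin, PySem.Int.band]
  rw [if_neg (not_le.mpr (Int.negSucc_lt_zero p)), if_pos hge]
  have h1 : (-(Int.negSucc p) - 1).toNat = p := by
    rw [Int.negSucc_eq]; omega
  have h2 : ((2 : Int) ^ f - 1).toNat = 2 ^ f - 1 := by
    rw [pvMask_cast]; exact Int.toNat_natCast _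
  rw [h1, h2, Nat.land_comm, Nat.and_two_pow_sub_one_eq_mod]
  simp

theorem pvMod_split (q r0 c : Nat) (hc : 0 < c) (hr : r0 < 2) :
    (2 * q + r0) % (2 * c) = 2 * (q % c) + r0 := by
  have hd : c * (q / c) + q % c = q := Nat.div_add_mod q c
  have hmul : (q / c) * (2 * c) = 2 * (c * (q / c)) := by ring
  conv_lhs => rw [show 2 * q + r0 = (2 * (q % c) + r0) + (q / c) * (2 * c) by rw [hmul]; omega]
  rw [Nat.add_mul_mod_self_right]
  exact Nat.mod_eq_of_lt (by have := Nat.mod_lt q hc; omega)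

-- window recurrences, matching A's loop step
theorem pvWin_parity (f : Nat) (n : Int) :
    pvWin (f + 1) n % 2 = (if PySem.Int.band n 1 == 1 then 1 else 0) := by
  cases n with
  | ofNat m =>
    rw [pvWin_ofNat, Nat.mod_mod_of_dvd _ ⟨2 ^ f, by ring⟩]
    have h2 : PySem.Int.band (Int.ofNat m) 1 = ((m &&& 1 : Nat) : Int) := by
      rw [show (Int.ofNat m) = ((m : Nat) : Int) from rfl,
        show (1 : Int) = ((1 : Nat) : Int) from rfl, PySem.Int.band_natCast]
    rw [h2, Nat.and_one_is_mod]
    rcases Nat.mod_two_eq_zero_or_one m with h | h <;> simp [h]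
  | negSucc p =>
    rw [pvWin_negSucc]
    have hband : PySem.Int.band (Int.negSucc p) 1 = ((1 - (1 &&& p) : Nat) : Int) := by
      simp only [PySem.Int.band]
      rw [if_neg (not_le.mpr (Int.negSucc_lt_zero p)), if_pos (by norm_num)]
      have h1 : (-(Int.negSucc p) - 1).toNat = p := by rw [Int.negSucc_eq]; omega
      norm_num [h1]
    have h1p : (1 &&& p) = p % 2 := by rw [Nat.land_comm, Nat.and_one_is_mod]
    rw [hband, h1p]
    have hE : 2 ^ (f + 1) = 2 * 2 ^ f := by ring
    have hrlt : p % 2 ^ (f + 1) < 2 ^ (f + 1) := Nat.mod_lt p (by positivity)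
    have hrpar : p % 2 ^ (f + 1) % 2 = p % 2 := Nat.mod_mod_of_dvd _ ⟨2 ^ f, by ring⟩
    have hf1 : (1 : Nat) ≤ 2 ^ f := Nat.one_le_two_pow
    rcases Nat.mod_two_eq_zero_or_one p with h | h
    · rw [h] at hrpar
      norm_num [h]
      omega
    · rw [h] at hrpar
      norm_num [h]
      omega

theorem pvWin_shift (f : Nat) (n : Int) :
    pvWin (f + 1) n / 2 = pvWin f (n >>> 1) := by
  cases n with
  | ofNat m =>
    have hsh : (Int.ofNat m) >>> (1 : Int) = Int.ofNat (m / 2) := rfl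
    rw [hsh, pvWin_ofNat, pvWin_ofNat]
    have := pvMod_split (m / 2) (m % 2) (2 ^ f) (by positivity) (Nat.mod_lt m (by norm_num))
    have hm : 2 * (m / 2) + m % 2 = m := Nat.div_add_mod m 2
    rw [hm] at this
    have hE : 2 ^ (f + 1) = 2 * 2 ^ f := by ring
    rw [hE]
    omega
  | negSucc p =>
    have hsh : (Int.negSucc p) >>> (1 : Int) = Int.negSucc (p / 2) := rfl
    rw [hsh, pvWin_negSucc, pvWin_negSucc]
    have := pvMod_split (p / 2) (p % 2) (2 ^ f) (by positivity) (Nat.mod_lt p (by norm_num))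
    have hm : 2 * (p / 2) + p % 2 = p := Nat.div_add_mod p 2
    rw [hm] at this
    have hE : 2 ^ (f + 1) = 2 * 2 ^ f := by ring
    have hs : (p / 2) % 2 ^ f < 2 ^ f := Nat.mod_lt _ (by positivity)
    have hf1 : (1 : Nat) ≤ 2 ^ f := Nat.one_le_two_pow
    rw [hE]
    omega

-- A's loop produces the letters of the set bits of the low (32 - i) window, labelled from i
theorem scan_spec (f : Nat) : ∀ (i : Nat) (n : Int) (acc : List String), i + f = 32 →
    numToLettersScan n i acc = acc ++ (pvIdxs f (pvWin f n)).map (fun j => pvLetter (i + j)) := by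
  induction f with
  | zero =>
    intro i n acc h
    rw [numToLettersScan]
    simp [pvIdxs, show ¬ i < 32 by omega]
  | succ f ih =>
    intro i n acc h
    rw [numToLettersScan, if_pos (by omega), ih (i + 1) (n >>> 1) _ (by omega),
      ← pvWin_shift f n]
    have hp := pvWin_parity f n
    have hfun : ∀ L : List Nat, (L.map (· + 1)).map (fun j => pvLetter (i + j))
        = L.map (fun j => pvLetter (i + 1 + j)) := by
      intro L
      rw [List.map_map]
      exact List.map_congr_left (fun j _ => by simp [Function.comp]; congr 1; omega)
    by_cases hb : PySem.Int.band n 1 = 1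
    · simp only [hb, beq_self_eq_true, if_true] at hp ⊢
      simp only [pvIdxs, hp, List.map_append, hfun]
      simp [pvLetter]
    · have hbeq : (PySem.Int.band n 1 == 1) = false := by simp [hb]
      simp only [hbeq, Bool.false_eq_true, if_false] at hp ⊢
      simp [pvIdxs, hp, hfun]

-- ===== B-side bit lemmas =====

theorem land_bit0_bit1 (a b : Nat) : (2 * a) &&& (2 * b + 1) = 2 * (a &&& b) := by
  apply Nat.eq_of_testBit_eq
  intro i
  cases i with
  | zero => simp [Nat.testBit_zero, Nat.mul_mod_right]
  | succ i =>
    have e1 : (2 * a) / 2 = a := by omega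
    have e2 : (2 * b + 1) / 2 = b := by omega
    have e3 : (2 * (a &&& b)) / 2 = a &&& b := by omega
    rw [Nat.testBit_land, Nat.testBit_add_one, Nat.testBit_add_one, Nat.testBit_add_one,
      e1, e2, e3, Nat.testBit_land]

theorem land_bit1_bit0 (a b : Nat) : (2 * a + 1) &&& (2 * b) = 2 * (a &&& b) := by
  apply Nat.eq_of_testBit_eq
  intro i
  cases i with
  | zero => simp [Nat.testBit_zero, Nat.mul_mod_right]
  | succ i =>
    have e1 : (2 * a + 1) / 2 = a := by omega
    have e2 : (2 * b) / 2 = b := by omega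
    have e3 : (2 * (a &&& b)) / 2 = a &&& b := by omega
    rw [Nat.testBit_land, Nat.testBit_add_one, Nat.testBit_add_one, Nat.testBit_add_one,
      e1, e2, e3, Nat.testBit_land]

-- clearing the lowest set bit: (2^t (2k+1)) & (2^t (2k+1) - 1) = 2^(t+1) k
theorem land_pred_pow (t : Nat) : ∀ k : Nat,
    (2 ^ t * (2 * k + 1)) &&& (2 ^ t * (2 * k + 1) - 1) = 2 ^ (t + 1) * k := by
  induction t with
  | zero =>
    intro k
    have h := land_bit1_bit0 k k
    simp only [Nat.and_self] at h
    simpa using h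
  | succ t ih =>
    intro k
    have hm : 2 ^ t * (2 * k + 1) ≠ 0 := by positivity
    have h1 : 2 ^ (t + 1) * (2 * k + 1) = 2 * (2 ^ t * (2 * k + 1)) := by ring
    have h2 : 2 ^ (t + 1) * (2 * k + 1) - 1 = 2 * (2 ^ t * (2 * k + 1) - 1) + 1 := by omega
    rw [h2, h1, land_bit0_bit1, ih k]
    ring

-- Python's (m & -m) for a positive m, via PySem.Int.band
theorem band_neg_self (m : Nat) (hm : m ≠ 0) :
    PySem.Int.band (m : Int) (-(m : Int)) = ((m - (m &&& (m - 1)) : Nat) : Int) := by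
  simp only [PySem.Int.band]
  rw [if_pos (by positivity), if_neg (by omega)]
  have h1 : (-(-(m : Int)) - 1).toNat = m - 1 := by omega
  rw [h1]
  simp

theorem bitLength_two_pow (t : Nat) : PySem.Int.bitLength ((2 ^ t : Nat) : Int) = t + 1 := by
  induction t with
  | zero => decide
  | succ t ih =>
    rw [PySem.Int.bitLength_natCast (by positivity),
      show 2 ^ (t + 1) / 2 = 2 ^ t by omega]
    omega

-- pvIdxs pops the lowest set bit in front
theorem pvIdxs_pop (t : Nat) : ∀ (f k : Nat), 2 ^ t * (2 * k + 1) < 2 ^ f →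
    pvIdxs f (2 ^ t * (2 * k + 1)) = t :: pvIdxs f (2 ^ (t + 1) * k) := by
  induction t with
  | zero =>
    intro f k hf
    match f with
    | 0 => norm_num at hf
    | f + 1 =>
      simp only [pvIdxs]
      rw [show 2 ^ 0 * (2 * k + 1) = 2 * k + 1 by ring, show 2 ^ (0 + 1) * k = 2 * k by ring]
      simp [Nat.mul_add_div (by norm_num : 0 < 2), Nat.mul_mod_right,
        Nat.mul_div_cancel_left _ (by norm_num : 0 < 2)]
  | succ t ih =>
    intro f k hf
    match f with
    | 0 => exfalso
           have h0 : 0 < 2 ^ (t + 1) * (2 * k + 1) := by positivity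
           norm_num at hf
    | f + 1 =>
      simp only [pvIdxs]
      have h1 : 2 ^ (t + 1) * (2 * k + 1) % 2 = 0 := by
        have : 2 ^ (t + 1) * (2 * k + 1) = 2 * (2 ^ t * (2 * k + 1)) := by ring
        omega
      have h2 : 2 ^ (t + 1) * (2 * k + 1) / 2 = 2 ^ t * (2 * k + 1) := by
        have : 2 ^ (t + 1) * (2 * k + 1) = 2 * (2 ^ t * (2 * k + 1)) := by ring
        omega
      have h3 : 2 ^ (t + 1 + 1) * k % 2 = 0 := by
        have : 2 ^ (t + 1 + 1) * k = 2 * (2 ^ (t + 1) * k) := by ring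
        omega
      have h4 : 2 ^ (t + 1 + 1) * k / 2 = 2 ^ (t + 1) * k := by
        have : 2 ^ (t + 1 + 1) * k = 2 * (2 ^ (t + 1) * k) := by ring
        omega
      have hlt : 2 ^ t * (2 * k + 1) < 2 ^ f := by
        have ha : 2 ^ (t + 1) * (2 * k + 1) = 2 * (2 ^ t * (2 * k + 1)) := by ring
        have hp : 2 ^ (f + 1) = 2 * 2 ^ f := by ring
        omega
      rw [h1, h2, h3, h4]
      simp only [show ¬ (0 : Nat) = 1 by omega, if_false, List.nil_append]
      rw [ih f k hlt]
      simp

-- B's loop produces the letters of the set bits, in increasing order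
theorem pop_spec (m : Nat) : ∀ (f : Nat) (acc : List String), m < 2 ^ f →
    numToLettersPop m acc = acc ++ (pvIdxs f m).map pvLetter := by
  induction m using Nat.strong_induction_on with
  | _ m ih =>
    intro f acc hf
    by_cases hm : m = 0
    · subst hm
      rw [numToLettersPop]
      simp [pvIdxs_zero]
    · obtain ⟨t, k', hodd, hmk⟩ := Nat.exists_eq_two_pow_mul_odd hm
      obtain ⟨k, hk⟩ := hodd
      have hmk' : m = 2 ^ t * (2 * k + 1) := by rw [hmk, hk]
      rw [numToLettersPop, dif_neg hm]
      have hd : m &&& (m - 1) = 2 ^ (t + 1) * k := by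
        rw [hmk']; exact land_pred_pow t k
      have hsub : m - (m &&& (m - 1)) = 2 ^ t := by
        rw [hd, hmk', show 2 ^ t * (2 * k + 1) = 2 ^ (t + 1) * k + 2 ^ t by ring,
          Nat.add_sub_cancel_left]
      have hband : PySem.Int.band (m : Int) (-(m : Int)) = ((2 ^ t : Nat) : Int) := by
        rw [band_neg_self m hm, hsub]
      have hlen : PySem.Int.bitLength (PySem.Int.band (m : Int) (-(m : Int))) - 1 = t := by
        rw [hband, bitLength_two_pow]
        omega
      have hdlt : m &&& (m - 1) < m := lt_of_le_of_lt Nat.and_le_right (Nat.sub_one_lt hm)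
      rw [ih _ hdlt f _ (lt_trans hdlt hf)]
      rw [hlen]
      conv_rhs => rw [hmk']
      rw [pvIdxs_pop t f k (by rw [← hmk']; exact hf), hd]
      simp [pvLetter]

-- the masked seed of B is the 32-bit window, and it is < 2^32
theorem seed_eq_win (n : Int) : (PySem.Int.band n 0xFFFFFFFF).toNat = pvWin 32 n := by
  rw [show (0xFFFFFFFF : Int) = (2 : Int) ^ 32 - 1 by norm_num]
  rfl

theorem win_lt (n : Int) : pvWin 32 n < 2 ^ 32 := by
  cases n with
  | ofNat m =>
    rw [pvWin_ofNat]
    exact Nat.mod_lt m (by norm_num)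
  | negSucc p =>
    rw [pvWin_negSucc]
    have : p % 2 ^ 32 < 2 ^ 32 := Nat.mod_lt p (by norm_num)
    omega

-- ===== VERDICT (by name: the statement is the Claim_ definition above) =====
theorem number_to_letters_spec : Claim_equal_number_to_letters := by
  intro n _
  unfold Spec_number_to_letters number_to_letters number_to_letters_alt
  rw [scan_spec 32 0 n [] rfl, seed_eq_win, pop_spec (pvWin 32 n) 32 [] (win_lt n)]
  simp
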